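-- pv_equiv track=rewrite | github.com/csaund/speech-and-semantics2gesture | caro_tests/experiment_analysis.py | prune_ontology
-- ===== SOURCE A (Python) =====
-- def prune_ontology(ont_set):
--     n_set = set()
--     n_keys = []
--     for el in ont_set:
--         key = el.split(':')[0]
--         if key not in n_keys:
--             n_set.add(str(el))
--             n_keys.append(key)
--     return n_set
-- ===== SOURCE B (Python) =====
-- def prune_ontology(ont_set):
--     first_at = {}
--     for i, el in reversed(list(enumerate(ont_set))):
--         first_at[el.split(':')[0]] = i
--     return {str(el) for i, el in enumerate(ont_set) if first_at[el.split(':')[0]] == i}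
-- ===== Notes on version B (the rewrite author's own statement) =====
-- stated objective: faster
-- what changed: Replaces A's single marking pass (result set plus a seen-keys list scanned with 'in' each iteration) by two index-based passes: a backwards overwrite pass recording each colon-prefix's first index, then a filter pass keeping exactly the elements standing at their key's first index — no membership test anywhere.
import Mathlib
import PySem

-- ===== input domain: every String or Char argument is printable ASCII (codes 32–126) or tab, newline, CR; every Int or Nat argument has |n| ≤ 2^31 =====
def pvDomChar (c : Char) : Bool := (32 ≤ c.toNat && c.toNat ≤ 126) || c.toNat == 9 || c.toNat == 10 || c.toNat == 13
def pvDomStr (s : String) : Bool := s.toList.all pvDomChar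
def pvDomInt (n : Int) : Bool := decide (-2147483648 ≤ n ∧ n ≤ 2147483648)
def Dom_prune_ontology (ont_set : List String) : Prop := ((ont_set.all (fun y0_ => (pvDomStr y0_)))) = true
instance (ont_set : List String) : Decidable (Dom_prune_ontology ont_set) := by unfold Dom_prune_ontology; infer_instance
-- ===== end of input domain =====

-- B replaces A's marking pass (result set + seen-keys list scanned each iteration) by two
-- index-based passes: a backwards overwrite pass recording each colon-prefix's first index,
-- then a filter pass keeping the elements standing at their key's first index (faster).
-- A returns a Python set; per the convention both ports return the distinct elements as a list.

-- el.split(':')[0] — split? with a nonempty separator is always 'some' of a nonempty list, so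
-- getD []/headD "" never supply their defaults; exact.
def pvKey (el : String) : String := ((PySem.Str.split? el ":").getD []).headD ""

-- ===== PORT A =====
def prune_ontology (ont_set : List String) : List String :=
  (ont_set.foldl
    (fun (st : PySem.Set String × List String) el =>
      if pvKey el ∈ st.2 then st
      else (PySem.Set.add st.1 el, st.2 ++ [pvKey el]))
    (PySem.Set.empty, [])).1

-- ===== PORT B =====
-- pass 1: for i, el in reversed(list(enumerate(ont_set))): first_at[el.split(':')[0]] = i
def pvFirstAt (ont_set : List String) : PySem.Dict String Int :=
  (PySem.List.enumerate ont_set).reverse.foldl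
    (fun d p => d.insert (pvKey p.2) p.1) PySem.Dict.empty

-- pass 2: {str(el) for i, el in enumerate(ont_set) if first_at[el.split(':')[0]] == i}.
-- first_at[k]: every key of an enumerated element was inserted in pass 1, so the KeyError
-- branch is unreachable; ported as getD with default -1 (< every enumerate index), exact.
def prune_ontology_alt (ont_set : List String) : List String :=
  let first_at := pvFirstAt ont_set
  PySem.Set.ofList
    (((PySem.List.enumerate ont_set).filter
        (fun p => first_at.getD (pvKey p.2) (-1) == p.1)).map (fun p => p.2))

-- ===== PRECONDITION & SPEC =====
def Spec_prune_ontology (ont_set : List String) (out : List String) : Prop := out = prune_ontology_alt ont_set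
instance (ont_set : List String) (out : List String) : Decidable (Spec_prune_ontology ont_set out) := by unfold Spec_prune_ontology; infer_instance

-- ===== CLAIM (what is proved, stated in full; the proofs are below) =====
def Claim_equal_prune_ontology : Prop := ∀ (ont_set : List String), Dom_prune_ontology ont_set → Spec_prune_ontology ont_set (prune_ontology ont_set)

-- ===== LEMMAS AND PROOFS =====

-- reference function: first occurrence per key, given already-seen keys ks
def pvG (l : List String) (ks : List String) : List String :=
  match l with
  | [] => []
  | h :: t => if pvKey h ∈ ks then pvG t ks else h :: pvG t (ks ++ [pvKey h])

-- pvG depends on ks only through membership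
lemma pvG_congr : ∀ (l ks ks' : List String), (∀ x, x ∈ ks ↔ x ∈ ks') → pvG l ks = pvG l ks' := by
  intro l
  induction l with
  | nil => intro ks ks' _; rfl
  | cons h t ih =>
    intro ks ks' hm
    simp only [pvG]
    by_cases hk : pvKey h ∈ ks
    · rw [if_pos hk, if_pos ((hm _).mp hk)]; exact ih ks ks' hm
    · rw [if_neg hk, if_neg (fun hc => hk ((hm _).mpr hc))]
      congr 1
      apply ih
      intro x; simp [hm x]

-- A's loop: starting from (s, ks) with every key of s seen, the result is s ++ pvG l ks
lemma pvA_inv : ∀ (l : List String) (s : PySem.Set String) (ks : List String),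
    (∀ x ∈ s, pvKey x ∈ ks) →
    (l.foldl
      (fun (st : PySem.Set String × List String) el =>
        if pvKey el ∈ st.2 then st
        else (PySem.Set.add st.1 el, st.2 ++ [pvKey el]))
      (s, ks)).1 = s ++ pvG l ks := by
  intro l
  induction l with
  | nil => intro s ks _; simp [pvG]
  | cons h t ih =>
    intro s ks hs
    simp only [List.foldl_cons, pvG]
    by_cases hk : pvKey h ∈ ks
    · rw [if_pos hk, if_pos hk]; exact ih s ks hs
    · rw [if_neg hk, if_neg hk]
      have hnm : h ∉ s := fun hm => hk (hs h hm)
      have hadd : PySem.Set.add s h = s ++ [h] := PySem.Set.add_of_not_mem hnm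
      simp only [hadd]
      rw [ih (s ++ [h]) (ks ++ [pvKey h]) ?_]
      · simp
      · intro x hx
        rcases List.mem_append.mp hx with hx | hx
        · exact List.mem_append_left _ (hs x hx)
        · simp at hx; subst hx; simp

-- elements of pvG have pairwise-distinct keys not in ks; hence pvG is Nodup
lemma pvG_keys : ∀ (l ks : List String),
    ((pvG l ks).map pvKey).Nodup ∧ ∀ x ∈ pvG l ks, pvKey x ∉ ks := by
  intro l
  induction l with
  | nil => intro ks; simp [pvG]
  | cons h t ih =>
    intro ks
    simp only [pvG]
    by_cases hk : pvKey h ∈ ks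
    · rw [if_pos hk]; exact ih ks
    · rw [if_neg hk]
      obtain ⟨hnd, hout⟩ := ih (ks ++ [pvKey h])
      refine ⟨?_, ?_⟩
      · simp only [List.map_cons, List.nodup_cons]
        refine ⟨?_, hnd⟩
        intro hmem
        obtain ⟨x, hx, hxe⟩ := List.mem_map.mp hmem
        exact hout x hx (by simp [hxe])
      · intro x hx
        rcases List.mem_cons.mp hx with hx | hx
        · subst hx; exact hk
        · intro hc; exact hout x hx (List.mem_append_left _ hc)

lemma pvG_nodup (l ks : List String) : (pvG l ks).Nodup :=
  List.Nodup.of_map pvKey (pvG_keys l ks).1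

-- the backwards overwrite fold looks up to the FIRST matching pair of the original list
lemma pvRevFold_get? : ∀ (ps : List (Int × String)) (d : PySem.Dict String Int) (k : String),
    (ps.reverse.foldl (fun d p => d.insert (pvKey p.2) p.1) d).get? k
    = match ps.find? (fun p => pvKey p.2 == k) with
      | some p => some p.1
      | none => d.get? k := by
  intro ps
  induction ps with
  | nil => intro d k; simp
  | cons p t ih =>
    intro d k
    simp only [List.reverse_cons, List.foldl_append, List.foldl_cons, List.foldl_nil,
      List.find?_cons]
    by_cases hk : pvKey p.2 = k
    · subst hk
      simp only [beq_self_eq_true]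
      rw [show ((t.reverse.foldl (fun d p => d.insert (pvKey p.2) p.1) d).insert
          (pvKey p.2) p.1).get? (pvKey p.2) = some p.1 from PySem.Dict.get?_insert_self _ _ _]
    · have hne : (pvKey p.2 == k) = false := by simp [hk]
      rw [hne]
      rw [PySem.Dict.get?_insert_of_ne _ _ (fun hc => hk hc.symm)]
      exact ih d k

-- B's first_at: the first enumerate pair whose element has key k
lemma pvFirstAt_get? (l : List String) (k : String) :
    (pvFirstAt l).get? k
    = ((PySem.List.enumerate l).find? (fun p => pvKey p.2 == k)).map (fun p => p.1) := by
  rw [pvFirstAt, pvRevFold_get?]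
  cases (PySem.List.enumerate l).find? (fun p => pvKey p.2 == k) <;> simp

-- no pair of (enumerate P 0) matches key k when k is not a key of P
lemma pvFind_enum_none (P : List String) (k : String) (hk : k ∉ P.map pvKey) :
    (PySem.List.enumerate P).find? (fun p => pvKey p.2 == k) = none := by
  rw [List.find?_eq_none]
  intro p hp
  obtain ⟨j, hj, hpe⟩ := (PySem.List.mem_enumerate_iff _ _ _).mp hp
  subst hpe
  simp only [beq_iff_eq]
  intro hc
  exact hk (by rw [← hc]; exact List.mem_map_of_mem (by simp))

-- main bridge: B's filter pass over the suffix S (at offset |P|) computes pvG S (keys of P)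
lemma pvB_main : ∀ (S P : List String),
    (((PySem.List.enumerate S (P.length : Int)).filter
        (fun p => (pvFirstAt (P ++ S)).getD (pvKey p.2) (-1) == p.1)).map (fun p => p.2))
    = pvG S (P.map pvKey) := by
  intro S
  induction S with
  | nil => intro P; simp [pvG, PySem.List.enumerate]
  | cons h t ih =>
    intro P
    rw [PySem.List.enumerate_cons, List.filter_cons]
    have hsplit := PySem.List.enumerate_append P (h :: t) 0
    have hget : (pvFirstAt (P ++ h :: t)).get? (pvKey h)
        = ((PySem.List.enumerate P ++ PySem.List.enumerate (h :: t) (0 + (P.length : Int))).find?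
            (fun p => pvKey p.2 == pvKey h)).map (fun p => p.1) := by
      rw [pvFirstAt_get?, hsplit]
    have hih : (((PySem.List.enumerate t ((P.length : Int) + 1)).filter
          (fun p => (pvFirstAt (P ++ h :: t)).getD (pvKey p.2) (-1) == p.1)).map (fun p => p.2))
        = pvG t ((P ++ [h]).map pvKey) := by
      have := ih (P ++ [h])
      simpa [List.append_assoc] using this
    by_cases hk : pvKey h ∈ P.map pvKey
    · -- key already occurs in the prefix: first index < |P|, head dropped
      obtain ⟨x, hx, hxe⟩ := List.mem_map.mp hk
      obtain ⟨j, hjlt, hxj⟩ := List.mem_iff_getElem.mp hx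
      have hfind : ∃ q, (PySem.List.enumerate P).find? (fun p => pvKey p.2 == pvKey h) = some q := by
        have hmem : ((j : Int), x) ∈ PySem.List.enumerate P := by
          rw [PySem.List.mem_enumerate_iff]
          exact ⟨j, hjlt, by simp [hxj]⟩
        have : ((PySem.List.enumerate P).find? (fun p => pvKey p.2 == pvKey h)).isSome := by
          apply List.find?_isSome.mpr
          refine ⟨((j : Int), x), hmem, ?_⟩
          simp [hxe]
        exact Option.isSome_iff_exists.mp this
      obtain ⟨q, hq⟩ := hfind
      have hqlt : q.1 < (P.length : Int) := by
        have hqmem := List.mem_of_find?_eq_some hq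
        obtain ⟨m, hm, hqe⟩ := (PySem.List.mem_enumerate_iff _ _ _).mp hqmem
        have hq1 : q.1 = 0 + (m : Int) := by rw [hqe]
        rw [hq1]; omega
      have hcond : ((pvFirstAt (P ++ h :: t)).getD (pvKey h) (-1) == (P.length : Int)) = false := by
        rw [PySem.Dict.getD_eq_get?_getD, hget, List.find?_append, hq]
        simp only [Option.some_or, Option.map_some, Option.getD_some, beq_eq_false_iff_ne, ne_eq]
        omega
      rw [hcond]
      simp only [Bool.false_eq_true, if_false]
      rw [hih]
      rw [pvG]
      rw [if_pos hk]
      apply pvG_congr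
      intro x; simp only [List.map_append, List.map_cons, List.map_nil, List.mem_append,
        List.mem_cons, List.not_mem_nil, or_false]
      constructor
      · rintro (hx' | hx')
        · exact hx'
        · subst hx'; exact hk
      · exact Or.inl
    · -- fresh key: the first match is the head itself, at index |P|; head kept
      have hnone := pvFind_enum_none P (pvKey h) hk
      have hcond : ((pvFirstAt (P ++ h :: t)).getD (pvKey h) (-1) == (P.length : Int)) = true := by
        rw [PySem.Dict.getD_eq_get?_getD, hget, List.find?_append, hnone]
        rw [PySem.List.enumerate_cons, List.find?_cons]
        simp only [beq_self_eq_true, Option.none_or, Option.map_some, Option.getD_some,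
          beq_iff_eq]
        omega
      rw [hcond]
      simp only [if_true, List.map_cons]
      rw [hih]
      rw [pvG, if_neg hk]
      simp

-- ===== VERDICT (by name: the statement is the Claim_ definition above) =====
theorem prune_ontology_spec : Claim_equal_prune_ontology := by
  intro ont_set _
  unfold Spec_prune_ontology prune_ontology prune_ontology_alt
  rw [pvA_inv ont_set PySem.Set.empty [] (by simp [PySem.Set.empty])]
  have hmain := pvB_main ont_set []
  simp only [List.length_nil, List.map_nil, List.nil_append, Nat.cast_zero] at hmain
  show PySem.Set.empty ++ pvG ont_set []
      = PySem.Set.ofList (((PySem.List.enumerate ont_set).filter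
          (fun p => (pvFirstAt ont_set).getD (pvKey p.2) (-1) == p.1)).map (fun p => p.2))
  rw [hmain, PySem.Set.ofList_eq_self_of_nodup _ (pvG_nodup ont_set [])]
  simp [PySem.Set.empty]
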